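-- pv_equiv track=rewrite | github.com/JoaoPauloDel/grafos-trabalho | teoremas.py | verificar_ore
-- ===== SOURCE A (Python) =====
-- def verificar_ore(grafo):
--     n = len(grafo)
--     if n < 3:
--         return False
--
--     vertices = list(grafo.keys())
--
--     for i in range(n):
--         for j in range(i + 1, n):
--             u = vertices[i]
--             v = vertices[j]
--
--             if v not in grafo[u]:
--                 grau_u = len(grafo[u])
--                 grau_v = len(grafo[v])
--
--                 if (grau_u + grau_v) < n:
--                     return False
--     return True
-- ===== SOURCE B (Python) =====
-- def verificar_ore(grafo):
--     n = len(grafo)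
--     if n < 3:
--         return False
--
--     items = list(grafo.items())
--     # all (index, key, degree) triples, ordered by degree (stable)
--     by_deg = sorted(((i, v, len(adj)) for i, (v, adj) in enumerate(items)),
--                     key=lambda t: t[2])
--     for i, (v, adj) in enumerate(items):
--         deg = len(adj)
--         nbrs = set(adj)
--         # first later non-neighbor in degree order has the minimal degree
--         # among all later non-neighbors of v
--         for wi, w, wdeg in by_deg:
--             if wi > i and w not in nbrs:
--                 if deg + wdeg < n:
--                     return False
--                 break
--     return True
-- ===== Notes on version B (the rewrite author's own statement) =====
-- stated objective: alternative
-- what changed: Instead of comparing every pair of vertices, B sorts the (index,key,degree) triples by degree once and, for each vertex, only tests the first later non-neighbor in that degree order, whose degree is minimal among all later non-neighbors.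
import Mathlib
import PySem

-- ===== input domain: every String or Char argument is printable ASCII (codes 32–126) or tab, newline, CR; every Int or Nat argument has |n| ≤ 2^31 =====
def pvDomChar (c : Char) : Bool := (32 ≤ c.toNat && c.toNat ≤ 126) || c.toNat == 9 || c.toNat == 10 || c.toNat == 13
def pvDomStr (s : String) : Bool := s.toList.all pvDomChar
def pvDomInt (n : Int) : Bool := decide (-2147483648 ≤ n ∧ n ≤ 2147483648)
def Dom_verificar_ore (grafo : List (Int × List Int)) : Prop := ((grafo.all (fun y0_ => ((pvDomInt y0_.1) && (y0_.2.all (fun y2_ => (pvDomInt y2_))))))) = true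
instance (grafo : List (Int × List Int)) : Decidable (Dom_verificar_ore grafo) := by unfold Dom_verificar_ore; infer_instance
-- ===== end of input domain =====

-- B replaces A's all-pairs scan by one sort by degree plus, per vertex, a scan stopping
-- at the first later non-neighbor in degree order (a genuinely different algorithm).

-- ===== PORT A =====
-- grafo[u]: first-match association-list lookup (u is always a key, so the default is never used)
def pvLookupA (grafo : List (Int × List Int)) (u : Int) : List Int :=
  ((grafo.find? (fun p => p.1 == u)).map Prod.snd).getD []

-- inner 'for j in range(i+1, n)' with early 'return False'
def pvAInner (grafo : List (Int × List Int)) (vertices : List Int) (n i : Int) :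
    List Int → Bool
  | [] => true
  | j :: js =>
    let u := PySem.List.pyGetD vertices i 0
    let v := PySem.List.pyGetD vertices j 0
    let adju := pvLookupA grafo u
    if !(adju.contains v) then
      if ((adju.length : Int) + ((pvLookupA grafo v).length : Int)) < n then false
      else pvAInner grafo vertices n i js
    else pvAInner grafo vertices n i js

-- outer 'for i in range(n)'
def pvAOuter (grafo : List (Int × List Int)) (vertices : List Int) (n : Int) :
    List Int → Bool
  | [] => true
  | i :: is_ =>
    if pvAInner grafo vertices n i (PySem.List.pyRange (i + 1) n 1) then
      pvAOuter grafo vertices n is_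
    else false

def verificar_ore (grafo : List (Int × List Int)) : Bool :=
  let n : Int := grafo.length
  if n < 3 then false
  else
    let vertices := grafo.map Prod.fst
    pvAOuter grafo vertices n (PySem.List.pyRange 0 n 1)

-- ===== PORT B =====
-- inner 'for wi, w, wdeg in by_deg' with break at the first later non-neighbor
def pvBInner (n i deg : Int) (nbrs : List Int) : List (Int × Int × Int) → Bool
  | [] => true
  | t :: rest =>
    if t.1 > i && !(PySem.Set.contains nbrs t.2.1) then
      if deg + t.2.2 < n then false else true
    else pvBInner n i deg nbrs rest

-- outer 'for i, (v, adj) in enumerate(items)'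
def pvBOuter (n : Int) (by_deg : List (Int × Int × Int)) :
    List (Int × Int × List Int) → Bool
  | [] => true
  | p :: rest =>
    let deg : Int := p.2.2.length
    let nbrs := PySem.Set.ofList p.2.2
    if pvBInner n p.1 deg nbrs by_deg then pvBOuter n by_deg rest else false

def verificar_ore_alt (grafo : List (Int × List Int)) : Bool :=
  let n : Int := grafo.length
  if n < 3 then false
  else
    let items := PySem.List.enumerate grafo 0
    let by_deg := PySem.List.sorted
      (items.map (fun p => (p.1, p.2.1, (p.2.2.length : Int)))) (fun t => t.2.2) false
    pvBOuter n by_deg items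

-- ===== PRECONDITION & SPEC =====
-- Pre_ excludes association lists with duplicate keys: they do not represent any Python
-- dict, which is the argument type of A (dict keys are unique).
def Pre_verificar_ore (grafo : List (Int × List Int)) : Prop :=
  (grafo.map Prod.fst).Nodup
instance (grafo : List (Int × List Int)) : Decidable (Pre_verificar_ore grafo) := by
  unfold Pre_verificar_ore; infer_instance

def pvWitness_verificar_ore : (List (Int × List Int)) :=
  [(0, [1, 2]), (1, [0, 2]), (2, [0, 1])]

def Spec_verificar_ore (grafo : List (Int × List Int)) (out : Bool) : Prop := out = verificar_ore_alt grafo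
instance (grafo : List (Int × List Int)) (out : Bool) : Decidable (Spec_verificar_ore grafo out) := by unfold Spec_verificar_ore; infer_instance

-- ===== CLAIM (what is proved, stated in full; the proofs are below) =====
def Claim_equal_verificar_ore : Prop := ∀ (grafo : List (Int × List Int)), Dom_verificar_ore grafo → Pre_verificar_ore grafo → Spec_verificar_ore grafo (verificar_ore grafo)

-- ===== LEMMAS AND PROOFS =====

-- the common mathematical content: every later pair (k, q) with key q absent from
-- adjacency k has degree sum ≥ n
def pvQ (grafo : List (Int × List Int)) : Prop :=
  ∀ k q : Nat, (hk : k < grafo.length) → (hq : q < grafo.length) → k < q →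
    (grafo[k].2.contains grafo[q].1 = true ∨
      ¬ (((grafo[k].2.length : Int) + (grafo[q].2.length : Int)) < (grafo.length : Int)))

lemma pvLookup_key (grafo : List (Int × List Int)) (h : (grafo.map Prod.fst).Nodup) :
    ∀ k, (hk : k < grafo.length) → pvLookupA grafo grafo[k].1 = grafo[k].2 := by
  induction grafo with
  | nil => intro k hk; simp at hk
  | cons p rest ih =>
    rw [List.map_cons, List.nodup_cons] at h
    intro k hk
    match k with
    | 0 => simp [pvLookupA]
    | Nat.succ m =>
      have hm : m < rest.length := by simpa using hk
      have hne : (p.1 == rest[m].1) = false := by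
        have hmem : rest[m].1 ∈ rest.map Prod.fst :=
          List.mem_map_of_mem (List.getElem_mem hm)
        exact beq_eq_false_iff_ne.mpr (fun e => h.1 (e ▸ hmem))
      have : (p :: rest)[m + 1] = rest[m] := by simp
      rw [this]
      have hrec := ih h.2 m hm
      unfold pvLookupA at hrec ⊢
      rw [List.find?_cons_of_neg (by simp [hne])]
      exact hrec

def pvACond (grafo : List (Int × List Int)) (vertices : List Int) (n i j : Int) : Prop :=
  (pvLookupA grafo (PySem.List.pyGetD vertices i 0)).contains (PySem.List.pyGetD vertices j 0) = true ∨
  ¬ (((pvLookupA grafo (PySem.List.pyGetD vertices i 0)).length : Int)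
      + ((pvLookupA grafo (PySem.List.pyGetD vertices j 0)).length : Int) < n)

lemma pvAInner_iff (grafo : List (Int × List Int)) (vertices : List Int) (n i : Int)
    (js : List Int) :
    pvAInner grafo vertices n i js = true ↔ ∀ j ∈ js, pvACond grafo vertices n i j := by
  induction js with
  | nil => simp [pvAInner]
  | cons j js ih =>
    simp only [pvAInner]
    split_ifs with h1 h2 <;> simp_all [pvACond]

lemma pvAOuter_iff (grafo : List (Int × List Int)) (vertices : List Int) (n : Int)
    (is_ : List Int) :
    pvAOuter grafo vertices n is_ = true ↔
      ∀ i ∈ is_, pvAInner grafo vertices n i (PySem.List.pyRange (i + 1) n 1) = true := by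
  induction is_ with
  | nil => simp [pvAOuter]
  | cons i is_ ih =>
    by_cases hi : pvAInner grafo vertices n i (PySem.List.pyRange (i + 1) n 1) = true
    · simp [pvAOuter, hi, ih]
    · simp [pvAOuter, hi]

lemma pvVert (grafo : List (Int × List Int)) (k : Nat) (hk : k < grafo.length) :
    PySem.List.pyGetD (grafo.map Prod.fst) (k : Int) 0 = grafo[k].1 := by
  rw [PySem.List.pyGetD_natCast, List.getD_eq_getElem _ _ (by simpa using hk)]
  simp

lemma pvA_iff (grafo : List (Int × List Int)) (h : (grafo.map Prod.fst).Nodup) :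
    verificar_ore grafo = true ↔ (3 ≤ (grafo.length : Int) ∧ pvQ grafo) := by
  unfold verificar_ore
  by_cases h3 : (grafo.length : Int) < 3
  · rw [if_pos h3]
    constructor
    · intro hc; cases hc
    · intro hc; exact absurd hc.1 (by omega)
  · rw [if_neg h3, pvAOuter_iff]
    simp only [pvAInner_iff]
    constructor
    · intro hAll
      refine ⟨by omega, ?_⟩
      intro k q hk hq hkq
      have hi : (k : Int) ∈ PySem.List.pyRange 0 (grafo.length : Int) 1 :=
        (PySem.List.mem_pyRange_one).mpr ⟨by omega, by exact_mod_cast hk⟩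
      have hj : (q : Int) ∈ PySem.List.pyRange ((k : Int) + 1) (grafo.length : Int) 1 :=
        (PySem.List.mem_pyRange_one).mpr ⟨by omega, by exact_mod_cast hq⟩
      have hc := hAll (k : Int) hi (q : Int) hj
      unfold pvACond at hc
      rw [pvVert grafo k hk, pvVert grafo q hq,
        pvLookup_key grafo h k hk, pvLookup_key grafo h q hq] at hc
      exact hc
    · rintro ⟨-, hQ⟩ i hi j hj
      obtain ⟨hi0, hin⟩ := (PySem.List.mem_pyRange_one).mp hi
      obtain ⟨hj1, hjn⟩ := (PySem.List.mem_pyRange_one).mp hj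
      have hik : i = ((i.toNat : Nat) : Int) := by omega
      have hjk : j = ((j.toNat : Nat) : Int) := by omega
      have hklen : i.toNat < grafo.length := by omega
      have hqlen : j.toNat < grafo.length := by omega
      have hc := hQ i.toNat j.toNat hklen hqlen (by omega)
      unfold pvACond
      rw [hik, hjk, pvVert grafo i.toNat hklen, pvVert grafo j.toNat hqlen,
        pvLookup_key grafo h i.toNat hklen, pvLookup_key grafo h j.toNat hqlen]
      exact hc

lemma pvBInner_iff (n i deg : Int) (nbrs : List Int) (l : List (Int × Int × Int)) :
    pvBInner n i deg nbrs l = true ↔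
      ∀ t, l.find? (fun t => decide (t.1 > i) && !(PySem.Set.contains nbrs t.2.1)) = some t →
        ¬ (deg + t.2.2 < n) := by
  induction l with
  | nil => simp [pvBInner]
  | cons t rest ih =>
    simp only [pvBInner]
    split_ifs with h1 h2 <;> simp_all

lemma pvFind_first_of_pairwise {α : Type} {R : α → α → Prop} {P : α → Bool} {l : List α} {t : α}
    (hp : l.Pairwise R) (hf : l.find? P = some t) :
    ∀ x ∈ l, P x = true → t = x ∨ R t x := by
  induction l with
  | nil => simp at hf
  | cons a l ih =>
    rw [List.pairwise_cons] at hp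
    by_cases hpa : P a = true
    · rw [List.find?_cons_of_pos hpa] at hf
      cases hf
      intro x hx _
      rcases List.mem_cons.mp hx with h1 | h1
      · exact Or.inl h1.symm
      · exact Or.inr (hp.1 x h1)
    · rw [List.find?_cons_of_neg (by simp_all)] at hf
      intro x hx hPx
      rcases List.mem_cons.mp hx with h1 | h1
      · exact absurd (h1 ▸ hPx) hpa
      · exact ih hp.2 hf x h1 hPx

lemma pvBInner_sorted (n i deg : Int) (nbrs : List Int) (info : List (Int × Int × Int)) :
    pvBInner n i deg nbrs (PySem.List.sorted info (fun t => t.2.2) false) = true ↔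
      ∀ t ∈ info, (i < t.1 ∧ t.2.1 ∉ nbrs) → ¬ (deg + t.2.2 < n) := by
  rw [pvBInner_iff]
  cases hf : (PySem.List.sorted info (fun t => t.2.2) false).find?
      (fun t => decide (t.1 > i) && !(PySem.Set.contains nbrs t.2.1)) with
  | none =>
    have hnone := List.find?_eq_none.mp hf
    constructor
    · intro _ t ht hc hlt
      exact hnone t ((PySem.List.mem_sorted _ _ _ _).mpr ht) (by simp [hc.1, hc.2])
    · intro _ t hsome
      cases hsome
  | some t =>
    have hPt := List.find?_some hf
    simp only [Bool.and_eq_true, decide_eq_true_eq, Bool.not_eq_eq_eq_not, Bool.not_true] at hPt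
    have hPt' : i < t.1 ∧ t.2.1 ∉ nbrs := by
      refine ⟨hPt.1, ?_⟩
      have := hPt.2
      simpa using this
    have htmem : t ∈ info :=
      (PySem.List.mem_sorted _ _ _ _).mp (List.mem_of_find?_eq_some hf)
    constructor
    · intro hAll t' ht' hc hlt
      have h1 := hAll t rfl
      have hmin := pvFind_first_of_pairwise
        (PySem.List.sorted_pairwise (key := fun t : Int × Int × Int => t.2.2) (xs := info)) hf
        t' ((PySem.List.mem_sorted _ _ _ _).mpr ht') (by simp [hc.1, hc.2])
      rcases hmin with e | hle
      · exact (e ▸ h1) hlt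
      · exact absurd hlt (by simp only [not_lt] at h1 ⊢; omega)
    · intro hAll t'' hsome
      cases hsome
      exact hAll t htmem hPt'

lemma pvBOuter_iff (n : Int) (by_deg : List (Int × Int × Int))
    (items : List (Int × Int × List Int)) :
    pvBOuter n by_deg items = true ↔
      ∀ p ∈ items,
        pvBInner n p.1 (p.2.2.length : Int) (PySem.Set.ofList p.2.2) by_deg = true := by
  induction items with
  | nil => simp [pvBOuter]
  | cons p rest ih =>
    by_cases hp : pvBInner n p.1 (p.2.2.length : Int) (PySem.Set.ofList p.2.2) by_deg = true
    · simp [pvBOuter, hp, ih]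
    · simp [pvBOuter, hp]

lemma pvB_iff (grafo : List (Int × List Int)) :
    verificar_ore_alt grafo = true ↔ (3 ≤ (grafo.length : Int) ∧ pvQ grafo) := by
  unfold verificar_ore_alt
  by_cases h3 : (grafo.length : Int) < 3
  · rw [if_pos h3]
    constructor
    · intro hc; cases hc
    · intro hc; exact absurd hc.1 (by omega)
  · rw [if_neg h3, pvBOuter_iff]
    simp only [pvBInner_sorted]
    constructor
    · intro hAll
      refine ⟨by omega, ?_⟩
      intro k q hk hq hkq
      have hp : ((k : Int), grafo[k]) ∈ PySem.List.enumerate grafo 0 := by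
        rw [PySem.List.mem_enumerate_iff]
        exact ⟨k, hk, by simp⟩
      have ht : ((q : Int), grafo[q].1, (grafo[q].2.length : Int)) ∈
          (PySem.List.enumerate grafo 0).map
            (fun p => (p.1, p.2.1, (p.2.2.length : Int))) := by
        rw [List.mem_map]
        exact ⟨((q : Int), grafo[q]), by
          rw [PySem.List.mem_enumerate_iff]; exact ⟨q, hq, by simp⟩, rfl⟩
      have hc := hAll ((k : Int), grafo[k]) hp
        ((q : Int), grafo[q].1, (grafo[q].2.length : Int)) ht
      by_cases hmem : grafo[q].1 ∈ grafo[k].2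
      · exact Or.inl (by simpa using hmem)
      · refine Or.inr ?_
        have := hc ⟨by simpa using hkq, by simpa using hmem⟩
        simpa using this
    · rintro ⟨-, hQ⟩ p hp t ht hc hlt
      rw [PySem.List.mem_enumerate_iff] at hp
      obtain ⟨k, hk, rfl⟩ := hp
      rw [List.mem_map] at ht
      obtain ⟨p', hp', rfl⟩ := ht
      rw [PySem.List.mem_enumerate_iff] at hp'
      obtain ⟨q, hq, rfl⟩ := hp'
      simp only [zero_add] at hc hlt
      have hkq : k < q := by
        have h1 := hc.1
        simp only at h1
        exact_mod_cast h1
      have hmem : grafo[q].1 ∉ grafo[k].2 := by simpa using hc.2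
      rcases hQ k q hk hq hkq with hm | hge
      · exact hmem (by simpa using hm)
      · exact hge (by simpa using hlt)

-- ===== VERDICT (by name: the statement is the Claim_ definition above) =====
theorem verificar_ore_spec : Claim_equal_verificar_ore := by
  intro grafo _ hpre
  unfold Spec_verificar_ore
  have hA := pvA_iff grafo hpre
  have hB := pvB_iff grafo
  cases hA' : verificar_ore grafo <;> cases hB' : verificar_ore_alt grafo <;>
    simp_all
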